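-- pv_equiv track=rewrite | github.com/blfitzgerald/SLAM | 4.SLAM.py | remove_isolated_ones_from_index
-- ===== SOURCE A (Python) =====
-- def remove_isolated_ones_from_index(arr, start_i, start_j):
--     def is_valid(i, j):
--         return 0 <= i < len(arr) and 0 <= j < len(arr[0]) and arr[i][j] == 1
--
--     stack = [(start_i, start_j)]
--
--     while stack:
--         i, j = stack.pop()
--         arr[i][j] = -1  # Mark visited
--
--         for dx, dy in [(1, 0), (-1, 0), (0, 1), (0, -1)]:
--             ni, nj = i + dx, j + dy
--             if is_valid(ni, nj):
--                 stack.append((ni, nj))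
--
--     # Remove isolated 1s
--     for i in range(len(arr)):
--         for j in range(len(arr[0])):
--             if arr[i][j] == 1:
--                 arr[i][j] = 0
--     return arr
-- ===== SOURCE B (Python) =====
-- def remove_isolated_ones_from_index(arr, start_i, start_j):
--     n, m = len(arr), len(arr[0])
--     arr[start_i][start_j] = -1  # the start cell itself is always marked visited
--
--     def live(i, j):
--         return 0 <= i < n and 0 <= j < m and arr[i][j] == 1
--
--     # duplicate-free FIFO worklist: the live neighbours of the start cell,
--     # then everything live reachable from them; the grid is not touched
--     # during the search.
--     seen = [(start_i + di, start_j + dj)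
--             for di, dj in ((1, 0), (-1, 0), (0, 1), (0, -1))
--             if live(start_i + di, start_j + dj)]
--     seen_set = set(seen)
--     k = 0
--     while k < len(seen):
--         i, j = seen[k]
--         k += 1
--         for c in ((i + 1, j), (i - 1, j), (i, j + 1), (i, j - 1)):
--             if live(*c) and c not in seen_set:
--                 seen_set.add(c)
--                 seen.append(c)
--
--     # single rewrite pass: connected region -> -1, remaining 1s -> 0
--     for i in range(n):
--         row = arr[i]
--         for j in range(m):
--             if (i, j) in seen_set:
--                 row[j] = -1
--             elif row[j] == 1:
--                 row[j] = 0
--     return arr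
-- ===== Notes on version B (the rewrite author's own statement) =====
-- stated objective: alternative
-- what changed: Replaces the in-place LIFO stack flood fill (which marks cells in the grid as it goes and can push and re-pop the same cell several times) with a duplicate-free FIFO worklist over an explicit seen set that never mutates the grid during the search, followed by a single rewrite pass that writes both the -1 region and the zeroed isolated 1s.
import Mathlib
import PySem

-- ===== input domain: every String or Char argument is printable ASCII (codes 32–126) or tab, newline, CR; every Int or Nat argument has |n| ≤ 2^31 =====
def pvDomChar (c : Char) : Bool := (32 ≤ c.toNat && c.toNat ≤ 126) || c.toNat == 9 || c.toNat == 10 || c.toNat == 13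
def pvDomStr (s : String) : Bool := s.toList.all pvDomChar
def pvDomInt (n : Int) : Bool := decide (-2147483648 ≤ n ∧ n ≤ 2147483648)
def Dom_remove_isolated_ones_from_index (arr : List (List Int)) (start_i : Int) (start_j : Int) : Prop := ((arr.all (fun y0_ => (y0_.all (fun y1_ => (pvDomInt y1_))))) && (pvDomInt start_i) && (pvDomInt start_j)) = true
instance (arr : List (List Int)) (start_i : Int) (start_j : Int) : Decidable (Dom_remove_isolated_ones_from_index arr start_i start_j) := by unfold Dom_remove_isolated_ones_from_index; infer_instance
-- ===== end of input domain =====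

-- B replaces A's in-place LIFO stack flood fill by a duplicate-free FIFO worklist with an
-- explicit seen set and a single final rewrite pass (alternative decomposition, same values).
-- Both Pythons mutate `arr` in place; they perform the same final mutation, and the
-- equivalence proved here is about the returned (= final) grid.

-- ===== PORT A =====
-- the four neighbour offsets, in A's (and B's) iteration order
def pvCellNbrs (i j : Int) : List (Int × Int) := [(i+1, j), (i-1, j), (i, j+1), (i, j-1)]

-- arr[i][j] = v with Python index semantics (negative wraps; out of range = IndexError,
-- excluded by Pre_; the total form leaves the list unchanged there)
def pvSetCell (g : List (List Int)) (i j v : Int) : List (List Int) :=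
  PySem.List.pySetD g i (PySem.List.pySetD (PySem.List.pyGetD g i []) j v)

-- is_valid(i, j): `0 <= i < len(arr) and 0 <= j < len(arr[0]) and arr[i][j] == 1`
-- (the reads are guarded by the bounds checks exactly as in Python; defaults are never hit
-- inside Pre_)
def pvIsValid (g : List (List Int)) (i j : Int) : Bool :=
  decide (0 ≤ i) && decide (i < (g.length : Int)) &&
  (decide (0 ≤ j) && decide (j < ((PySem.List.pyGetD g 0 []).length : Int))) &&
  (PySem.List.pyGetD (PySem.List.pyGetD g i []) j 0 == (1 : Int))

-- the while loop; head of the list = top of the Python stack; fuel only totalizes the loop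
def pvLoopA : List (List Int) → List (Int × Int) → Nat → List (List Int)
  | g, _, 0 => g
  | g, [], _ + 1 => g
  | g, c :: rest, fuel + 1 =>
      let g' := pvSetCell g c.1 c.2 (-1)
      let pushes := (pvCellNbrs c.1 c.2).filter (fun d => pvIsValid g' d.1 d.2)
      pvLoopA g' (pushes.reverse ++ rest) fuel

def remove_isolated_ones_from_index (arr : List (List Int)) (start_i : Int) (start_j : Int) : List (List Int) :=
  let g := pvLoopA arr [(start_i, start_j)] (5 * arr.length * (arr.headD []).length + 10)
  let m := (g.headD []).length
  g.map (fun row => row.mapIdx (fun j v => if j < m ∧ v = 1 then 0 else v))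

-- ===== PORT B =====
-- live(i, j) with the precomputed n, m
def pvLive (g : List (List Int)) (n m : Nat) (c : Int × Int) : Bool :=
  decide (0 ≤ c.1) && decide (c.1 < (n : Int)) &&
  (decide (0 ≤ c.2) && decide (c.2 < (m : Int))) &&
  (PySem.List.pyGetD (PySem.List.pyGetD g c.1 []) c.2 0 == (1 : Int))

-- the FIFO worklist: `seen` is the list, `seenSet` the mirroring Python set; k is the read
-- pointer; fuel only totalizes the loop
def pvLoopB (g : List (List Int)) (n m : Nat) :
    List (Int × Int) → PySem.Set (Int × Int) → Nat → Nat → List (Int × Int) × PySem.Set (Int × Int)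
  | seen, seenSet, _, 0 => (seen, seenSet)
  | seen, seenSet, k, fuel + 1 =>
      if h : k < seen.length then
        let c := seen[k]
        let st := (pvCellNbrs c.1 c.2).foldl
          (fun p d => if pvLive g n m d && !(PySem.Set.contains p.2 d)
                      then (p.1 ++ [d], PySem.Set.add p.2 d) else p)
          (seen, seenSet)
        pvLoopB g n m st.1 st.2 (k + 1) fuel
      else (seen, seenSet)

def remove_isolated_ones_from_index_alt (arr : List (List Int)) (start_i : Int) (start_j : Int) : List (List Int) :=
  let n := arr.length
  let m := (PySem.List.pyGetD arr 0 []).length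
  let g := pvSetCell arr start_i start_j (-1)
  let seen0 := (pvCellNbrs start_i start_j).filter (pvLive g n m)
  let st := pvLoopB g n m seen0 (PySem.Set.ofList seen0) 0 (n * m + 1)
  g.mapIdx (fun i row => row.mapIdx (fun j v =>
    if j < m then
      (if PySem.Set.contains st.2 ((i : Int), (j : Int)) then -1
       else if v = 1 then 0 else v)
    else v))

-- ===== PRECONDITION & SPEC =====
-- Exactly the inputs on which the Python A returns: a nonempty grid, Python-valid start
-- indices (negative indices wrap, as in Python), and every row at least as long as row 0
-- (on a shorter row both programs raise IndexError in the final sweep).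
def Pre_remove_isolated_ones_from_index (arr : List (List Int)) (start_i : Int) (start_j : Int) : Prop :=
  0 < arr.length ∧ -(arr.length : Int) ≤ start_i ∧ start_i < (arr.length : Int) ∧
  -(((PySem.List.pyGetD arr start_i []).length : Int)) ≤ start_j ∧
  start_j < ((PySem.List.pyGetD arr start_i []).length : Int) ∧
  ∀ row ∈ arr, (arr.headD []).length ≤ row.length
instance (arr : List (List Int)) (start_i : Int) (start_j : Int) : Decidable (Pre_remove_isolated_ones_from_index arr start_i start_j) := by unfold Pre_remove_isolated_ones_from_index; infer_instance
def pvWitness_remove_isolated_ones_from_index : List (List Int) × Int × Int := ([[1, 1], [0, 1]], 0, 0)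

def Spec_remove_isolated_ones_from_index (arr : List (List Int)) (start_i : Int) (start_j : Int) (out : List (List Int)) : Prop := out = remove_isolated_ones_from_index_alt arr start_i start_j
instance (arr : List (List Int)) (start_i : Int) (start_j : Int) (out : List (List Int)) : Decidable (Spec_remove_isolated_ones_from_index arr start_i start_j out) := by unfold Spec_remove_isolated_ones_from_index; infer_instance

-- ===== CLAIM (what is proved, stated in full; the proofs are below) =====
def Claim_equal_remove_isolated_ones_from_index : Prop := ∀ (arr : List (List Int)) (start_i : Int) (start_j : Int), Dom_remove_isolated_ones_from_index arr start_i start_j → Pre_remove_isolated_ones_from_index arr start_i start_j → Spec_remove_isolated_ones_from_index arr start_i start_j (remove_isolated_ones_from_index arr start_i start_j)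

-- ===== LEMMAS AND PROOFS =====

-- the value of cell (i, j) (0 outside the grid; a live cell is never 0, so no confusion)
def pvValN (g : List (List Int)) (i j : Nat) : Int := (g.getD i []).getD j 0

-- `live` as a proposition
def pvLiveP (g : List (List Int)) (n m : Nat) (c : Int × Int) : Prop :=
  0 ≤ c.1 ∧ c.1 < (n : Int) ∧ 0 ≤ c.2 ∧ c.2 < (m : Int) ∧ pvValN g c.1.toNat c.2.toNat = 1

-- cells reachable from the seed list S through live cells
inductive pvReach (g : List (List Int)) (n m : Nat) (S : List (Int × Int)) : (Int × Int) → Prop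
  | base (c : Int × Int) : c ∈ S → pvLiveP g n m c → pvReach g n m S c
  | step (c d : Int × Int) : pvReach g n m S d → c ∈ pvCellNbrs d.1 d.2 → pvLiveP g n m c →
      pvReach g n m S c

-- number of live-valued cells (termination budget for A's loop)
def pvOnes (g : List (List Int)) (n m : Nat) : Nat :=
  (((Finset.range n) ×ˢ (Finset.range m)).filter (fun p => pvValN g p.1 p.2 = 1)).card

-- A's stack invariant: every entry is live, or an already-marked cell all of whose live
-- neighbours occur closer to the top of the stack (so it pushes nothing when re-popped)
def pvStackInv (g : List (List Int)) (n m : Nat) (s : List (Int × Int)) : Prop :=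
  ∀ (k : Nat) (c : Int × Int), s[k]? = some c →
    pvLiveP g n m c ∨
    (0 ≤ c.1 ∧ 0 ≤ c.2 ∧ pvValN g c.1.toNat c.2.toNat = -1 ∧
      ∀ d ∈ pvCellNbrs c.1 c.2, pvLiveP g n m d → ∃ k' < k, s[k']? = some d)

lemma pvReach_live {g n m S c} (h : pvReach g n m S c) : pvLiveP g n m c := by
  cases h <;> assumption

lemma pvReach_nil {g n m c} : ¬ pvReach g n m [] c := by
  intro h; induction h with
  | base c hc _ => simp at hc
  | step c d hd _ _ ih => exact ih

lemma pvPyGetD_nonneg {α : Type} (xs : List α) (i : Int) (d : α) (h : 0 ≤ i) :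
    PySem.List.pyGetD xs i d = xs.getD i.toNat d := by
  rw [show i = ((i.toNat : Nat) : Int) from (Int.toNat_of_nonneg h).symm,
    PySem.List.pyGetD_natCast]
  simp [List.getD_eq_getElem?_getD]
  congr 2
  omega

lemma pvLiveP_congr {g g' n m c} (hval : ∀ i j, pvValN g i j = pvValN g' i j) :
    pvLiveP g n m c ↔ pvLiveP g' n m c := by
  unfold pvLiveP; rw [hval]

lemma pvReach_congr {g g' n m} {S S' : List (Int × Int)}
    (hval : ∀ i j, pvValN g i j = pvValN g' i j) (hS : ∀ c, c ∈ S ↔ c ∈ S') :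
    ∀ c, pvReach g n m S c → pvReach g' n m S' c := by
  intro c h
  induction h with
  | base c hc hl => exact .base c ((hS c).1 hc) ((pvLiveP_congr hval).1 hl)
  | step c d _ hadj hl ih => exact .step c d ih hadj ((pvLiveP_congr hval).1 hl)

lemma pvLive_iff {g n m c} : pvLive g n m c = true ↔ pvLiveP g n m c := by
  unfold pvLive pvLiveP
  constructor
  · intro h
    simp only [Bool.and_eq_true, decide_eq_true_eq, beq_iff_eq] at h
    obtain ⟨⟨⟨h1, h2⟩, h3, h4⟩, h5⟩ := h
    rw [pvPyGetD_nonneg _ _ _ h3, pvPyGetD_nonneg _ _ _ h1] at h5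
    exact ⟨h1, h2, h3, h4, h5⟩
  · intro ⟨h1, h2, h3, h4, h5⟩
    simp only [Bool.and_eq_true, decide_eq_true_eq, beq_iff_eq]
    refine ⟨⟨⟨h1, h2⟩, h3, h4⟩, ?_⟩
    rw [pvPyGetD_nonneg _ _ _ h3, pvPyGetD_nonneg _ _ _ h1]
    exact h5

lemma pvIsValid_iff {g : List (List Int)} {i j : Int} :
    pvIsValid g i j = true ↔ pvLiveP g g.length ((g.getD 0 []).length) (i, j) := by
  have h : pvIsValid g i j = pvLive g g.length ((g.getD 0 []).length) (i, j) := by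
    unfold pvIsValid pvLive
    rw [PySem.List.pyGetD_zero]
  rw [h, pvLive_iff]

lemma pvValN_ne_zero_lt {g : List (List Int)} {i j : Nat} (h : pvValN g i j ≠ 0) :
    i < g.length ∧ j < (g.getD i []).length := by
  unfold pvValN at h
  constructor
  · by_contra hi
    have hz : g.getD i [] = [] := by
      rw [List.getD_eq_getElem?_getD, List.getElem?_eq_none (by omega)]; rfl
    rw [hz] at h; simp at h
  · by_contra hj
    apply h
    rw [List.getD_eq_getElem?_getD, List.getElem?_eq_none (by omega)]
    rfl

lemma pvSetCell_length (g : List (List Int)) (i j v : Int) :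
    (pvSetCell g i j v).length = g.length := by
  unfold pvSetCell; exact PySem.List.length_pySetD ..

lemma pvPyIdx?_lt {n : Nat} {i : Int} {k : Nat} (h : PySem.List.pyIdx? n i = some k) :
    k < n := by
  unfold PySem.List.pyIdx? at h
  split_ifs at h <;> simp_all <;> omega

lemma pvPySetD_getElem? {α : Type} (xs : List α) (i : Int) (v : α) (t : Nat) :
    (PySem.List.pySetD xs i v)[t]? =
      if PySem.List.pyIdx? xs.length i = some t then some v else xs[t]? := by
  unfold PySem.List.pySetD PySem.List.pySet?
  cases h : PySem.List.pyIdx? xs.length i with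
  | none => simp [h]
  | some k =>
    have hk := pvPyIdx?_lt h
    simp only [h, Option.map_some, Option.getD_some, List.getElem?_set, Option.some.injEq]
    split_ifs <;> simp_all <;> omega

lemma pvPyIdx?_natCast_lt {n i0 : Nat} (h : i0 < n) :
    PySem.List.pyIdx? n (i0 : Int) = some i0 := by
  unfold PySem.List.pyIdx?
  split_ifs <;> simp_all <;> omega

lemma pvSetCell_rowlen (g : List (List Int)) (i j v : Int) (t : Nat) :
    ((pvSetCell g i j v).getD t []).length = (g.getD t []).length := by
  unfold pvSetCell
  rw [List.getD_eq_getElem?_getD, List.getD_eq_getElem?_getD, pvPySetD_getElem?]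
  split_ifs with h
  · unfold PySem.List.pyGetD PySem.List.pyGet?
    rw [h, Option.bind_some]
    cases hrow : g[t]? <;> simp [hrow, PySem.List.length_pySetD]
  · rfl

lemma pvSetCell_valN (g : List (List Int)) (i0 j0 : Nat) (v : Int)
    (hi : i0 < g.length) (hj : j0 < (g.getD i0 []).length) :
    ∀ i j, pvValN (pvSetCell g (i0 : Int) (j0 : Int) v) i j =
      if i = i0 ∧ j = j0 then v else pvValN g i j := by
  intro i j
  unfold pvValN pvSetCell
  simp only [List.getD_eq_getElem?_getD]
  rw [pvPySetD_getElem?, pvPyIdx?_natCast_lt hi]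
  have hrow : PySem.List.pyGetD g (i0 : Int) [] = g[i0]?.getD [] := by
    rw [PySem.List.pyGetD_natCast, List.getD_eq_getElem?_getD]
  have hj' : j0 < (g[i0]?.getD []).length := by
    rw [← List.getD_eq_getElem?_getD]; exact hj
  by_cases hii : i0 = i
  · subst hii
    rw [if_pos rfl, Option.getD_some, hrow, PySem.List.pySetD_natCast, List.getElem?_set]
    by_cases hjj : j0 = j
    · subst hjj
      rw [if_pos rfl, if_pos hj', if_pos ⟨rfl, rfl⟩, Option.getD_some]
    · rw [if_neg hjj, if_neg (by omega)]
  · rw [if_neg (by simp [hii]), if_neg (by omega)]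

lemma pvLiveP_update {g g' : List (List Int)} {n m : Nat} {e : Int × Int}
    (he1 : 0 ≤ e.1) (he2 : 0 ≤ e.2)
    (hval : ∀ i j, pvValN g' i j = if i = e.1.toNat ∧ j = e.2.toNat then -1 else pvValN g i j) :
    ∀ c, pvLiveP g' n m c ↔ (pvLiveP g n m c ∧ c ≠ e) := by
  intro c
  unfold pvLiveP
  constructor
  · intro ⟨h1, h2, h3, h4, h5⟩
    rw [hval] at h5
    split_ifs at h5 with hif
    refine ⟨⟨h1, h2, h3, h4, h5⟩, ?_⟩
    intro hc; subst hc; exact hif ⟨rfl, rfl⟩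
  · intro ⟨⟨h1, h2, h3, h4, h5⟩, hne⟩
    refine ⟨h1, h2, h3, h4, ?_⟩
    rw [hval, if_neg]
    · exact h5
    · intro ⟨hi, hj⟩
      apply hne
      rw [Prod.ext_iff]
      omega

lemma pvReach_peel {g g' : List (List Int)} {n m : Nat} {e : Int × Int}
    {rest s' : List (Int × Int)}
    (he : pvLiveP g n m e)
    (hval : ∀ i j, pvValN g' i j = if i = e.1.toNat ∧ j = e.2.toNat then -1 else pvValN g i j)
    (hs' : ∀ d, d ∈ s' ↔ ((d ∈ pvCellNbrs e.1 e.2 ∧ pvLiveP g' n m d) ∨ d ∈ rest)) :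
    ∀ c, pvReach g n m (e :: rest) c ↔ (c = e ∨ pvReach g' n m s' c) := by
  intro c
  have hupd := pvLiveP_update (n := n) (m := m) he.1 he.2.2.1 hval
  constructor
  · intro h
    induction h with
    | base c hc hl =>
      rcases List.mem_cons.1 hc with rfl | hc
      · exact Or.inl rfl
      · by_cases hce : c = e
        · exact Or.inl hce
        · exact Or.inr (.base c ((hs' c).2 (Or.inr hc)) ((hupd c).2 ⟨hl, hce⟩))
    | step c d hd hadj hl ih =>
      by_cases hce : c = e
      · exact Or.inl hce
      · have hl' : pvLiveP g' n m c := (hupd c).2 ⟨hl, hce⟩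
        rcases ih with rfl | hd'
        · exact Or.inr (.base c ((hs' c).2 (Or.inl ⟨hadj, hl'⟩)) hl')
        · exact Or.inr (.step c d hd' hadj hl')
  · intro h
    rcases h with rfl | h
    · exact .base c (List.mem_cons_self ..) he
    · induction h with
      | base c hc hl =>
        have hlg := (hupd c).1 hl
        rcases (hs' c).1 hc with ⟨hadj, _⟩ | hcr
        · exact .step c e (.base e (List.mem_cons_self ..) he) hadj hlg.1
        · exact .base c (List.mem_cons_of_mem _ hcr) hlg.1
      | step c d hd hadj hl ih =>
        exact .step c d ih hadj ((hupd c).1 hl).1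

lemma pvReach_cons_not_live {g n m e} {rest : List (Int × Int)} (he : ¬ pvLiveP g n m e) :
    ∀ c, pvReach g n m (e :: rest) c ↔ pvReach g n m rest c := by
  intro c
  constructor
  · intro h
    induction h with
    | base c hc hl =>
      rcases List.mem_cons.1 hc with hc | hc
      · subst hc; exact absurd hl he
      · exact .base c hc hl
    | step c d _ hadj hl ih => exact .step c d ih hadj hl
  · intro h
    induction h with
    | base c hc hl => exact .base c (List.mem_cons_of_mem _ hc) hl
    | step c d _ hadj hl ih => exact .step c d ih hadj hl

lemma pvOnes_le (g : List (List Int)) (n m : Nat) : pvOnes g n m ≤ n * m := by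
  unfold pvOnes
  calc _ ≤ ((Finset.range n) ×ˢ (Finset.range m)).card := Finset.card_filter_le _ _
    _ = n * m := by simp

lemma pvOnes_congr {g g' : List (List Int)} {n m : Nat}
    (hval : ∀ i j, pvValN g i j = pvValN g' i j) : pvOnes g n m = pvOnes g' n m := by
  unfold pvOnes
  congr 1
  exact Finset.filter_congr (fun p _ => by rw [hval])

lemma pvOnes_update {g g' : List (List Int)} {n m : Nat} {e : Int × Int}
    (he : pvLiveP g n m e)
    (hval : ∀ i j, pvValN g' i j = if i = e.1.toNat ∧ j = e.2.toNat then -1 else pvValN g i j) :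
    pvOnes g' n m + 1 = pvOnes g n m := by
  obtain ⟨h1, h2, h3, h4, h5⟩ := he
  set eN : Nat × Nat := (e.1.toNat, e.2.toNat) with heN
  have hmem : eN ∈ ((Finset.range n) ×ˢ (Finset.range m)).filter
      (fun p => pvValN g p.1 p.2 = 1) := by
    simp only [Finset.mem_filter, Finset.mem_product, Finset.mem_range, heN]
    exact ⟨⟨by omega, by omega⟩, h5⟩
  have hset : ((Finset.range n) ×ˢ (Finset.range m)).filter (fun p => pvValN g' p.1 p.2 = 1)
      = (((Finset.range n) ×ˢ (Finset.range m)).filter (fun p => pvValN g p.1 p.2 = 1)).erase eN := by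
    ext p
    simp only [Finset.mem_filter, Finset.mem_erase, Finset.mem_product, Finset.mem_range, hval]
    constructor
    · intro ⟨hp, hv⟩
      split_ifs at hv with hif
      exact ⟨by intro h; subst h; exact hif ⟨rfl, rfl⟩, hp, hv⟩
    · intro ⟨hne, hp, hv⟩
      refine ⟨hp, ?_⟩
      rw [if_neg]
      · exact hv
      · intro ⟨hi, hj⟩
        exact hne (by simp only [heN, Prod.ext_iff]; exact ⟨hi, hj⟩)
  unfold pvOnes
  rw [hset, Finset.card_erase_of_mem hmem]
  have := Finset.card_pos.2 ⟨eN, hmem⟩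
  omega

lemma pvCellNbrs_nodup (i j : Int) : (pvCellNbrs i j).Nodup := by
  simp [pvCellNbrs, Prod.ext_iff]; omega

lemma pvNodupLive_length_le {g : List (List Int)} {n m : Nat} {l : List (Int × Int)}
    (hd : l.Nodup) (hl : ∀ c ∈ l, pvLiveP g n m c) : l.length ≤ n * m := by
  classical
  set f : Int × Int → Nat × Nat := fun c => (c.1.toNat, c.2.toNat) with hf
  have hinj : ∀ x ∈ l, ∀ y ∈ l, f x = f y → x = y := by
    intro x hx y hy hxy
    obtain ⟨hx1, _, hx3, _, _⟩ := hl x hx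
    obtain ⟨hy1, _, hy3, _, _⟩ := hl y hy
    simp only [hf, Prod.ext_iff] at hxy ⊢
    omega
  have hnd : (l.map f).Nodup := List.Nodup.map_on hinj hd
  have hsub : (l.map f).toFinset ⊆ (Finset.range n) ×ˢ (Finset.range m) := by
    intro p hp
    simp only [List.mem_toFinset, List.mem_map] at hp
    obtain ⟨c, hc, hcp⟩ := hp
    obtain ⟨h1, h2, h3, h4, _⟩ := hl c hc
    simp only [Finset.mem_product, Finset.mem_range, ← hcp, hf]
    omega
  calc l.length = (l.map f).length := (List.length_map ..).symm
    _ = (l.map f).toFinset.card := (List.toFinset_card_of_nodup hnd).symm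
    _ ≤ ((Finset.range n) ×ˢ (Finset.range m)).card := Finset.card_le_card hsub
    _ = n * m := by simp

lemma pvGetElem?_some_lt {α : Type} {l : List α} {k : Nat} {a : α} (h : l[k]? = some a) :
    k < l.length := by
  by_contra hx
  rw [List.getElem?_eq_none (by omega)] at h
  cases h

lemma pvGetElem?_some_mem {α : Type} {l : List α} {k : Nat} {a : α} (h : l[k]? = some a) :
    a ∈ l := by
  obtain ⟨hlt, hget⟩ := List.getElem?_eq_some_iff.1 h
  exact hget ▸ List.getElem_mem _

-- ===== A-side main loop lemma =====
lemma pvLoopA_spec (n m : Nat) : ∀ (fuel : Nat) (g : List (List Int)) (s : List (Int × Int)),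
    g.length = n → (g.getD 0 []).length = m →
    pvStackInv g n m s →
    5 * pvOnes g n m + s.length + 1 ≤ fuel →
    ((pvLoopA g s fuel).length = g.length ∧
     (∀ t, ((pvLoopA g s fuel).getD t []).length = (g.getD t []).length) ∧
     ∀ i j : Nat,
       (pvReach g n m s ((i : Int), (j : Int)) → pvValN (pvLoopA g s fuel) i j = -1) ∧
       (¬ pvReach g n m s ((i : Int), (j : Int)) → pvValN (pvLoopA g s fuel) i j = pvValN g i j)) := by
  intro fuel
  induction fuel with
  | zero => intro g s _ _ _ hf; exact absurd hf (by omega)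
  | succ fuel ih =>
    intro g s hn hm hinv hf
    cases s with
    | nil =>
      exact ⟨rfl, fun t => rfl, fun i j => ⟨fun hR => absurd hR pvReach_nil, fun _ => rfl⟩⟩
    | cons e rest =>
      have hinv0 := hinv 0 e rfl
      set g' := pvSetCell g e.1 e.2 (-1) with hg'
      set pushes := (pvCellNbrs e.1 e.2).filter (fun d => pvIsValid g' d.1 d.2) with hpushes
      have hloop : pvLoopA g (e :: rest) (fuel + 1) = pvLoopA g' (pushes.reverse ++ rest) fuel := rfl
      have hlen' : g'.length = g.length := pvSetCell_length ..
      have hrow' : ∀ t, (g'.getD t []).length = (g.getD t []).length := fun t => pvSetCell_rowlen g e.1 e.2 (-1) t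
      have hn' : g'.length = n := by rw [hlen', hn]
      have hm' : (g'.getD 0 []).length = m := by rw [hrow', hm]
      have hpushmem : ∀ d, d ∈ pushes ↔ (d ∈ pvCellNbrs e.1 e.2 ∧ pvLiveP g' n m d) := by
        intro d
        rw [hpushes, List.mem_filter]
        have hiv := pvIsValid_iff (g := g') (i := d.1) (j := d.2)
        rw [hn', hm'] at hiv
        simp only [hiv]
      simp only [List.length_cons] at hf
      rcases hinv0 with hLive | ⟨hne1, hne2, hval_e, hwit⟩
      · -- popped cell is live: mark it and push its live neighbours
        obtain ⟨he1, he2, he3, he4, he5⟩ := hLive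
        have hbound := pvValN_ne_zero_lt (g := g) (i := e.1.toNat) (j := e.2.toNat)
          (by rw [he5]; norm_num)
        have hcast : pvSetCell g e.1 e.2 (-1)
            = pvSetCell g ((e.1.toNat : Nat) : Int) ((e.2.toNat : Nat) : Int) (-1) := by
          rw [Int.toNat_of_nonneg he1, Int.toNat_of_nonneg he3]
        have hval' : ∀ i j, pvValN g' i j =
            if i = e.1.toNat ∧ j = e.2.toNat then -1 else pvValN g i j := by
          rw [hg', hcast]
          exact pvSetCell_valN g _ _ _ hbound.1 hbound.2
        have hupd := pvLiveP_update (n := n) (m := m) he1 he3 hval'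
        have hones : pvOnes g' n m + 1 = pvOnes g n m :=
          pvOnes_update ⟨he1, he2, he3, he4, he5⟩ hval'
        have hinv' : pvStackInv g' n m (pushes.reverse ++ rest) := by
          intro k c hk
          by_cases hkp : k < pushes.reverse.length
          · rw [List.getElem?_append_left hkp] at hk
            have hc : c ∈ pushes := List.mem_reverse.1 (pvGetElem?_some_mem hk)
            exact Or.inl ((hpushmem c).1 hc).2
          · push_neg at hkp
            rw [List.getElem?_append_right hkp] at hk
            have hold := hinv (k - pushes.reverse.length + 1) c (by simpa using hk)
            rcases hold with hcl | ⟨hc1, hc2, hc3, hcwit⟩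
            · by_cases hce : c = e
              · subst hce
                refine Or.inr ⟨he1, he3, by rw [hval', if_pos ⟨rfl, rfl⟩], ?_⟩
                intro d hd hld
                have hdp : d ∈ pushes.reverse := List.mem_reverse.2 ((hpushmem d).2 ⟨hd, hld⟩)
                obtain ⟨t, htd⟩ := List.mem_iff_getElem?.1 hdp
                have htl := pvGetElem?_some_lt htd
                exact ⟨t, by omega, by rw [List.getElem?_append_left htl]; exact htd⟩
              · exact Or.inl ((hupd c).2 ⟨hcl, hce⟩)
            · have hce : c ≠ e := by
                intro hcc; subst hcc; rw [he5] at hc3; norm_num at hc3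
              refine Or.inr ⟨hc1, hc2, ?_, ?_⟩
              · rw [hval', if_neg, hc3]
                intro ⟨hii, hjj⟩
                apply hce
                rw [Prod.ext_iff]
                omega
              · intro d hd hld
                have hldg : pvLiveP g n m d := ((hupd d).1 hld).1
                obtain ⟨k', hk', hkd⟩ := hcwit d hd hldg
                cases k' with
                | zero =>
                  have hde : e = d := by simpa using hkd
                  subst hde
                  exact absurd ((hupd e).1 hld).2 (by simp)
                | succ t =>
                  refine ⟨pushes.reverse.length + t, by omega, ?_⟩
                  rw [List.getElem?_append_right (by omega)]
                  simpa using hkd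
        have hp4 : pushes.length ≤ 4 := by
          calc pushes.length ≤ (pvCellNbrs e.1 e.2).length := List.length_filter_le ..
            _ = 4 := rfl
        have hf' : 5 * pvOnes g' n m + (pushes.reverse ++ rest).length + 1 ≤ fuel := by
          simp only [List.length_append, List.length_reverse]
          omega
        obtain ⟨ihlen, ihrow, ihval⟩ := ih g' (pushes.reverse ++ rest) hn' hm' hinv' hf'
        have hs' : ∀ d, d ∈ pushes.reverse ++ rest ↔
            ((d ∈ pvCellNbrs e.1 e.2 ∧ pvLiveP g' n m d) ∨ d ∈ rest) := by
          intro d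
          rw [List.mem_append, List.mem_reverse, hpushmem]
        have hpeel := pvReach_peel (n := n) (m := m) ⟨he1, he2, he3, he4, he5⟩ hval' hs'
        rw [hloop]
        refine ⟨by rw [ihlen, hlen'], fun t => by rw [ihrow, hrow'], fun i j => ⟨?_, ?_⟩⟩
        · intro hR
          rcases (hpeel _).1 hR with hce | hR'
          · by_cases hR' : pvReach g' n m (pushes.reverse ++ rest) ((i : Int), (j : Int))
            · exact (ihval i j).1 hR'
            · rw [(ihval i j).2 hR', hval', if_pos]
              have hcc := Prod.ext_iff.1 hce
              exact ⟨by omega, by omega⟩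
          · exact (ihval i j).1 hR'
        · intro hR
          have hne : ((i : Int), (j : Int)) ≠ e := fun hcc => hR ((hpeel _).2 (Or.inl hcc))
          have hR' : ¬ pvReach g' n m (pushes.reverse ++ rest) ((i : Int), (j : Int)) :=
            fun hcc => hR ((hpeel _).2 (Or.inr hcc))
          rw [(ihval i j).2 hR', hval', if_neg]
          intro ⟨hii, hjj⟩
          apply hne
          rw [Prod.ext_iff]
          constructor <;> simp <;> omega
      · -- popped cell is already marked: by the invariant it pushes nothing
        have hnoLive : ∀ d ∈ pvCellNbrs e.1 e.2, ¬ pvLiveP g n m d := by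
          intro d hd hld
          obtain ⟨k', hk', _⟩ := hwit d hd hld
          omega
        have hbound := pvValN_ne_zero_lt (g := g) (i := e.1.toNat) (j := e.2.toNat)
          (by rw [hval_e]; norm_num)
        have hcast : pvSetCell g e.1 e.2 (-1)
            = pvSetCell g ((e.1.toNat : Nat) : Int) ((e.2.toNat : Nat) : Int) (-1) := by
          rw [Int.toNat_of_nonneg hne1, Int.toNat_of_nonneg hne2]
        have hval' : ∀ i j, pvValN g' i j =
            if i = e.1.toNat ∧ j = e.2.toNat then -1 else pvValN g i j := by
          rw [hg', hcast]
          exact pvSetCell_valN g _ _ _ hbound.1 hbound.2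
        have hvalsame : ∀ i j, pvValN g' i j = pvValN g i j := by
          intro i j
          rw [hval']
          split_ifs with hif
          · obtain ⟨rfl, rfl⟩ := hif
            exact hval_e.symm
          · rfl
        have hcongr : ∀ c, pvLiveP g' n m c ↔ pvLiveP g n m c :=
          fun c => pvLiveP_congr hvalsame
        have hpush_nil : pushes = [] := by
          rw [hpushes]
          rw [List.filter_eq_nil_iff]
          intro d hd hvd
          have hiv := pvIsValid_iff (g := g') (i := d.1) (j := d.2)
          rw [hn', hm'] at hiv
          have : pvLiveP g' n m d := by simpa using hiv.1 hvd
          exact hnoLive d hd ((hcongr d).1 this)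
        have hinv' : pvStackInv g' n m rest := by
          intro k c hk
          have hold := hinv (k + 1) c (by simpa using hk)
          rcases hold with hcl | ⟨hc1, hc2, hc3, hcwit⟩
          · exact Or.inl ((hcongr c).2 hcl)
          · refine Or.inr ⟨hc1, hc2, by rw [hvalsame]; exact hc3, ?_⟩
            intro d hd hld
            obtain ⟨k', hk', hkd⟩ := hcwit d hd ((hcongr d).1 hld)
            cases k' with
            | zero =>
              have hde : e = d := by simpa using hkd
              subst hde
              have : pvLiveP g n m e := (hcongr e).1 hld
              rw [pvLiveP] at this
              rw [hval_e] at this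
              exact absurd this.2.2.2.2 (by norm_num)
            | succ t => exact ⟨t, by omega, by simpa using hkd⟩
        have hones' : pvOnes g' n m = pvOnes g n m := pvOnes_congr hvalsame
        have hf' : 5 * pvOnes g' n m + rest.length + 1 ≤ fuel := by omega
        obtain ⟨ihlen, ihrow, ihval⟩ := ih g' rest hn' hm' hinv' hf'
        have hloop2 : pvLoopA g (e :: rest) (fuel + 1) = pvLoopA g' rest fuel := by
          rw [hloop, hpush_nil]
          simp
        have hnotlive_e : ¬ pvLiveP g n m e := by
          intro hl
          rw [pvLiveP] at hl
          rw [hval_e] at hl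
          exact absurd hl.2.2.2.2 (by norm_num)
        have hreach_iff : ∀ c, pvReach g n m (e :: rest) c ↔ pvReach g' n m rest c := by
          intro c
          rw [pvReach_cons_not_live hnotlive_e]
          constructor
          · exact pvReach_congr (fun i j => (hvalsame i j).symm) (fun c => Iff.rfl) c
          · exact pvReach_congr hvalsame (fun c => Iff.rfl) c
        rw [hloop2]
        refine ⟨by rw [ihlen, hlen'], fun t => by rw [ihrow, hrow'], fun i j => ⟨?_, ?_⟩⟩
        · intro hR
          exact (ihval i j).1 ((hreach_iff _).1 hR)
        · intro hR
          rw [(ihval i j).2 (fun hcc => hR ((hreach_iff _).2 hcc)), hvalsame]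

-- ===== B-side main loop lemma =====
lemma pvContains_eq {t : List (Int × Int)} {x : Int × Int} :
    PySem.Set.contains t x = decide (x ∈ t) := by
  by_cases hx : x ∈ t
  · rw [(PySem.Set.contains_iff t x).2 hx, decide_eq_true hx]
  · rcases Bool.eq_false_or_eq_true (PySem.Set.contains t x) with ht | hf
    · exact absurd ((PySem.Set.contains_iff t x).1 ht) hx
    · rw [hf, decide_eq_false hx]

lemma pvFold_char (g : List (List Int)) (n m : Nat) :
    ∀ (l : List (Int × Int)), l.Nodup → ∀ (s : List (Int × Int)),
    (l.foldl (fun p d => if pvLive g n m d && !(PySem.Set.contains p.2 d)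
                         then (p.1 ++ [d], PySem.Set.add p.2 d) else p)
      (s, s)) =
    (s ++ l.filter (fun d => pvLive g n m d && !(PySem.Set.contains s d)),
     s ++ l.filter (fun d => pvLive g n m d && !(PySem.Set.contains s d))) := by
  intro l
  induction l with
  | nil => intro _ s; simp
  | cons d rest ih =>
    intro hnd s
    have hdr : d ∉ rest := (List.nodup_cons.1 hnd).1
    have hrest := (List.nodup_cons.1 hnd).2
    simp only [List.foldl_cons, List.filter_cons]
    by_cases hcond : (pvLive g n m d && !(PySem.Set.contains s d)) = true
    · have hnotmem : d ∉ s := by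
        rw [Bool.and_eq_true] at hcond
        simpa [pvContains_eq] using hcond.2
      rw [if_pos hcond, hcond, if_pos rfl]
      rw [PySem.Set.add_of_not_mem hnotmem, ih hrest (s ++ [d])]
      have hfc : rest.filter (fun x => pvLive g n m x && !(PySem.Set.contains (s ++ [d]) x))
          = rest.filter (fun x => pvLive g n m x && !(PySem.Set.contains s x)) := by
        apply List.filter_congr
        intro x hx
        have hxd : x ≠ d := fun hh => hdr (hh ▸ hx)
        simp [pvContains_eq, List.mem_append, hxd]
      rw [hfc]
      simp
    · rw [if_neg hcond]
      have hcond' : (pvLive g n m d && !(PySem.Set.contains s d)) = false :=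
        Bool.eq_false_iff.2 hcond
      rw [hcond']
      simp only [Bool.false_eq_true, if_false]
      exact ih hrest s

lemma pvLoopB_spec (g : List (List Int)) (n m : Nat) (seeds : List (Int × Int)) :
    ∀ (fuel : Nat) (seen seenSet : List (Int × Int)) (k : Nat),
    seenSet = seen → seen.Nodup →
    (∀ c ∈ seen, pvLiveP g n m c) →
    (∀ c ∈ seen, pvReach g n m seeds c) →
    k ≤ seen.length →
    (∀ t c, t < k → seen[t]? = some c →
        ∀ d ∈ pvCellNbrs c.1 c.2, pvLiveP g n m d → d ∈ seen) →
    n * m + 1 ≤ fuel + k →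
    ((pvLoopB g n m seen seenSet k fuel).2 = (pvLoopB g n m seen seenSet k fuel).1 ∧
     (∀ c ∈ seen, c ∈ (pvLoopB g n m seen seenSet k fuel).1) ∧
     (∀ c ∈ (pvLoopB g n m seen seenSet k fuel).1, pvReach g n m seeds c) ∧
     (∀ c ∈ (pvLoopB g n m seen seenSet k fuel).1,
        ∀ d ∈ pvCellNbrs c.1 c.2, pvLiveP g n m d → d ∈ (pvLoopB g n m seen seenSet k fuel).1)) := by
  intro fuel
  induction fuel with
  | zero =>
    intro seen seenSet k hset hnd hlive hreach hk hproc hfuel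
    have := pvNodupLive_length_le hnd hlive
    omega
  | succ fuel ih =>
    intro seen seenSet k hset hnd hlive hreach hk hproc hfuel
    have hss := hset.symm
    subst hss
    by_cases hkl : k < seen.length
    · have hcmem : seen[k] ∈ seen := List.getElem_mem hkl
      set c : Int × Int := seen[k] with hc
      set news := (pvCellNbrs c.1 c.2).filter
        (fun d => pvLive g n m d && !(PySem.Set.contains seen d)) with hnews
      have heq : pvLoopB g n m seen seen k (fuel + 1)
          = pvLoopB g n m (seen ++ news) (seen ++ news) (k + 1) fuel := by
        rw [pvLoopB, dif_pos hkl]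
        show pvLoopB g n m
            ((pvCellNbrs c.1 c.2).foldl
              (fun p d => if pvLive g n m d && !(PySem.Set.contains p.2 d)
                          then (p.1 ++ [d], PySem.Set.add p.2 d) else p) (seen, seen)).1
            ((pvCellNbrs c.1 c.2).foldl
              (fun p d => if pvLive g n m d && !(PySem.Set.contains p.2 d)
                          then (p.1 ++ [d], PySem.Set.add p.2 d) else p) (seen, seen)).2
            (k + 1) fuel = _
        rw [pvFold_char g n m _ (pvCellNbrs_nodup c.1 c.2) seen]
      have hnewsP : ∀ d, d ∈ news ↔
          (d ∈ pvCellNbrs c.1 c.2 ∧ pvLiveP g n m d ∧ d ∉ seen) := by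
        intro d
        rw [hnews, List.mem_filter]
        simp only [Bool.and_eq_true, pvLive_iff, Bool.not_eq_eq_eq_not, Bool.not_true,
          pvContains_eq, decide_eq_false_iff_not]
      have hnewsnd : news.Nodup := List.Nodup.filter _ (pvCellNbrs_nodup c.1 c.2)
      have hdisj : ∀ a ∈ seen, ∀ b ∈ news, a ≠ b := by
        intro a ha b hb hab
        exact ((hnewsP b).1 hb).2.2 (hab ▸ ha)
      have hnd' : (seen ++ news).Nodup := List.nodup_append.2 ⟨hnd, hnewsnd, hdisj⟩
      have hlive' : ∀ c' ∈ seen ++ news, pvLiveP g n m c' := by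
        intro c' hc'
        rcases List.mem_append.1 hc' with h | h
        · exact hlive c' h
        · exact ((hnewsP c').1 h).2.1
      have hreach' : ∀ c' ∈ seen ++ news, pvReach g n m seeds c' := by
        intro c' hc'
        rcases List.mem_append.1 hc' with h | h
        · exact hreach c' h
        · obtain ⟨hd, hl, _⟩ := (hnewsP c').1 h
          exact .step c' c (hreach c hcmem) hd hl
      have hk' : k + 1 ≤ (seen ++ news).length := by
        rw [List.length_append]; omega
      have hproc' : ∀ t c', t < k + 1 → (seen ++ news)[t]? = some c' →
          ∀ d ∈ pvCellNbrs c'.1 c'.2, pvLiveP g n m d → d ∈ seen ++ news := by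
        intro t c' ht htc
        have htlt : t < seen.length := by omega
        rw [List.getElem?_append_left htlt] at htc
        by_cases htk : t < k
        · intro d hd hld
          exact List.mem_append_left _ (hproc t c' htk htc d hd hld)
        · have ht' : t = k := by omega
          subst ht'
          rw [List.getElem?_eq_getElem htlt] at htc
          have hcc : c' = c := by cases htc; rfl
          subst hcc
          intro d hd hld
          by_cases hds : d ∈ seen
          · exact List.mem_append_left _ hds
          · exact List.mem_append_right _ ((hnewsP d).2 ⟨hd, hld, hds⟩)
      obtain ⟨h1, h2, h3, h4⟩ := ih (seen ++ news) (seen ++ news) (k + 1) rfl hnd' hlive'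
        hreach' hk' hproc' (by omega)
      rw [heq]
      exact ⟨h1, fun c' hc' => h2 c' (List.mem_append_left _ hc'), h3, h4⟩
    · have heq : pvLoopB g n m seen seen k (fuel + 1) = (seen, seen) := by
        rw [pvLoopB, dif_neg hkl]
      rw [heq]
      refine ⟨rfl, fun c hc => hc, hreach, ?_⟩
      intro c hc d hd hld
      obtain ⟨t, htc⟩ := List.mem_iff_getElem?.1 hc
      have htl : t < seen.length := pvGetElem?_some_lt htc
      exact hproc t c (by omega) htc d hd hld

lemma pvReach_subset {g n m} {seeds S : List (Int × Int)}
    (h0 : ∀ c ∈ seeds, pvLiveP g n m c → c ∈ S)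
    (hcl : ∀ c ∈ S, ∀ d ∈ pvCellNbrs c.1 c.2, pvLiveP g n m d → d ∈ S) :
    ∀ c, pvReach g n m seeds c → c ∈ S := by
  intro c h
  induction h with
  | base c hc hl => exact h0 c hc hl
  | step c d hd hadj hl ih => exact hcl d ih c hadj hl

-- nested extensionality through pvValN
lemma pvGridExt {g h : List (List Int)} (hlen : g.length = h.length)
    (hrow : ∀ t, (g.getD t []).length = (h.getD t []).length)
    (hval : ∀ i j, pvValN g i j = pvValN h i j) : g = h := by
  have hrow' : ∀ i (h1 : i < g.length) (h2 : i < h.length), g[i].length = h[i].length := by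
    intro i h1 h2
    have hw := hrow i
    rwa [List.getD_eq_getElem?_getD, List.getD_eq_getElem?_getD,
      List.getElem?_eq_getElem h1, List.getElem?_eq_getElem h2,
      Option.getD_some, Option.getD_some] at hw
  apply List.ext_getElem hlen
  intro i h1 h2
  apply List.ext_getElem (hrow' i h1 h2)
  intro j hj1 hj2
  have hw := hval i j
  unfold pvValN at hw
  simp only [List.getD_eq_getElem?_getD, List.getElem?_eq_getElem h1,
    List.getElem?_eq_getElem h2, Option.getD_some] at hw
  rwa [List.getElem?_eq_getElem hj1, List.getElem?_eq_getElem hj2,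
    Option.getD_some, Option.getD_some] at hw

lemma pvValN_map_mapIdx (gl : List (List Int)) (f : Nat → Int → Int) (i j : Nat) :
    pvValN (gl.map (fun row => row.mapIdx f)) i j =
      if i < gl.length ∧ j < (gl.getD i []).length then f j (pvValN gl i j) else 0 := by
  unfold pvValN
  simp only [List.getD_eq_getElem?_getD, List.getElem?_map]
  cases h : gl[i]? with
  | none =>
    have hi := List.getElem?_eq_none_iff.1 h
    rw [if_neg (by omega)]
    simp
  | some row =>
    have hi : i < gl.length := by
      by_contra hx
      rw [List.getElem?_eq_none (by omega)] at h; cases h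
    simp only [Option.map_some, Option.getD_some, List.getElem?_mapIdx]
    cases hj : row[j]? with
    | none =>
      have hjlen := List.getElem?_eq_none_iff.1 hj
      rw [if_neg (by omega)]
      simp
    | some v =>
      have hjlen : j < row.length := by
        by_contra hx
        rw [List.getElem?_eq_none (by omega)] at hj; cases hj
      rw [if_pos ⟨hi, hjlen⟩]
      simp

lemma pvValN_mapIdx_mapIdx (gl : List (List Int)) (f : Nat → Nat → Int → Int) (i j : Nat) :
    pvValN (gl.mapIdx (fun i row => row.mapIdx (f i))) i j =
      if i < gl.length ∧ j < (gl.getD i []).length then f i j (pvValN gl i j) else 0 := by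
  unfold pvValN
  simp only [List.getD_eq_getElem?_getD, List.getElem?_mapIdx]
  cases h : gl[i]? with
  | none =>
    have hi := List.getElem?_eq_none_iff.1 h
    rw [if_neg (by omega)]
    simp
  | some row =>
    have hi : i < gl.length := by
      by_contra hx
      rw [List.getElem?_eq_none (by omega)] at h; cases h
    simp only [Option.map_some, Option.getD_some, List.getElem?_mapIdx]
    cases hj : row[j]? with
    | none =>
      have hjlen := List.getElem?_eq_none_iff.1 hj
      rw [if_neg (by omega)]
      simp
    | some v =>
      have hjlen : j < row.length := by
        by_contra hx
        rw [List.getElem?_eq_none (by omega)] at hj; cases hj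
      rw [if_pos ⟨hi, hjlen⟩]
      simp

lemma pvRowlen_map_mapIdx (gl : List (List Int)) (f : Nat → Int → Int) (t : Nat) :
    ((gl.map (fun row => row.mapIdx f)).getD t []).length = (gl.getD t []).length := by
  rw [List.getD_eq_getElem?_getD, List.getD_eq_getElem?_getD, List.getElem?_map]
  cases h : gl[t]? <;> simp

lemma pvRowlen_mapIdx_mapIdx (gl : List (List Int)) (f : Nat → Nat → Int → Int) (t : Nat) :
    ((gl.mapIdx (fun i row => row.mapIdx (f i))).getD t []).length = (gl.getD t []).length := by
  rw [List.getD_eq_getElem?_getD, List.getD_eq_getElem?_getD, List.getElem?_mapIdx]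
  cases h : gl[t]? <;> simp

lemma pvHeadD_eq_getD (l : List (List Int)) : l.headD [] = l.getD 0 [] := by
  cases l <;> rfl

lemma pvLoopA_cons (g : List (List Int)) (i j : Int) (rest : List (Int × Int)) (fuel : Nat) :
    pvLoopA g ((i, j) :: rest) (fuel + 1) =
      pvLoopA (pvSetCell g i j (-1))
        (((pvCellNbrs i j).filter
            (fun d => pvIsValid (pvSetCell g i j (-1)) d.1 d.2)).reverse ++ rest) fuel := rfl

lemma pvBoolExt {a b : Bool} (h : a = true ↔ b = true) : a = b := by
  cases a <;> cases b <;> simp_all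

-- ===== main equality =====
lemma pvMain (arr : List (List Int)) (si sj : Int) :
    remove_isolated_ones_from_index arr si sj = remove_isolated_ones_from_index_alt arr si sj := by
  simp only [remove_isolated_ones_from_index, remove_isolated_ones_from_index_alt]
  set n := arr.length with hn0
  set m := (PySem.List.pyGetD arr 0 []).length with hm0
  set g := pvSetCell arr si sj (-1) with hg0
  have hgn : g.length = n := by rw [hg0, pvSetCell_length, hn0]
  have hgrow : ∀ t, (g.getD t []).length = (arr.getD t []).length := fun t => by
    rw [hg0]; exact pvSetCell_rowlen arr si sj (-1) t
  have hmarr : (arr.getD 0 []).length = m := by rw [hm0, PySem.List.pyGetD_zero]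
  have hgm : (g.getD 0 []).length = m := by rw [hgrow 0, hmarr]
  have hhead : (arr.headD []).length = m := by rw [pvHeadD_eq_getD, hmarr]
  rw [hhead, show 5 * n * m + 10 = (5 * n * m + 9) + 1 from by omega, pvLoopA_cons,
    List.append_nil]
  set seedsA := (pvCellNbrs si sj).filter (fun d => pvIsValid g d.1 d.2) with hseedsA
  set seeds := (pvCellNbrs si sj).filter (pvLive g n m) with hseeds
  have hIsValid_eq_Live : ∀ d : Int × Int, pvIsValid g d.1 d.2 = pvLive g n m d := by
    intro d
    have h1 := pvIsValid_iff (g := g) (i := d.1) (j := d.2)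
    rw [hgn, hgm] at h1
    have h2 := pvLive_iff (g := g) (n := n) (m := m) (c := d)
    exact pvBoolExt (h1.trans h2.symm)
  have hseeds_eq : seedsA = seeds := by
    rw [hseedsA, hseeds]
    exact List.filter_congr fun d _ => hIsValid_eq_Live d
  have hseedsnd : seeds.Nodup := List.Nodup.filter _ (pvCellNbrs_nodup si sj)
  have hseedslive : ∀ c ∈ seeds, pvLiveP g n m c := by
    intro c hc
    exact pvLive_iff.1 (List.of_mem_filter hc)
  set stv := pvLoopB g n m seeds (PySem.Set.ofList seeds) 0 (n * m + 1) with hstv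
  obtain ⟨hB21, hBsub, hBreach, hBclosed⟩ := pvLoopB_spec g n m seeds (n * m + 1) seeds
    (PySem.Set.ofList seeds) 0 (PySem.Set.ofList_eq_self_of_nodup _ hseedsnd) hseedsnd
    hseedslive (fun c hc => .base c hc (hseedslive c hc)) (Nat.zero_le _)
    (fun t c ht _ => absurd ht (by omega)) (by omega)
  have hmem_iff : ∀ c, c ∈ stv.1 ↔ pvReach g n m seeds c := by
    intro c
    exact ⟨hBreach c, pvReach_subset (fun c hc _ => hBsub c hc) hBclosed c⟩
  have hcont : ∀ x, PySem.Set.contains stv.2 x = decide (x ∈ stv.1) := by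
    intro x
    rw [hB21, pvContains_eq]
  have hinvA : pvStackInv g n m seedsA.reverse := by
    intro k c hk
    have hc : c ∈ seedsA := List.mem_reverse.1 (pvGetElem?_some_mem hk)
    rw [hseeds_eq] at hc
    exact Or.inl (hseedslive c hc)
  have hfA : 5 * pvOnes g n m + seedsA.reverse.length + 1 ≤ 5 * n * m + 9 := by
    have h1 := pvOnes_le g n m
    have h2 : seedsA.length ≤ 4 := by
      calc seedsA.length ≤ (pvCellNbrs si sj).length := by
            rw [hseedsA]; exact List.length_filter_le ..
        _ = 4 := rfl
    rw [List.length_reverse, Nat.mul_assoc]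
    omega
  obtain ⟨hAlen, hArow, hAval⟩ := pvLoopA_spec n m (5 * n * m + 9) g seedsA.reverse hgn hgm hinvA hfA
  set gl := pvLoopA g seedsA.reverse (5 * n * m + 9) with hgl
  have hmA : (gl.headD []).length = m := by rw [pvHeadD_eq_getD, hArow 0, hgm]
  rw [hmA]
  have hmemrev : ∀ d : Int × Int, d ∈ seedsA.reverse ↔ d ∈ seeds := by
    intro d
    rw [List.mem_reverse, hseeds_eq]
  have hReqv : ∀ c, pvReach g n m seedsA.reverse c ↔ pvReach g n m seeds c := fun c =>
    ⟨pvReach_congr (fun _ _ => rfl) hmemrev c,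
     pvReach_congr (fun _ _ => rfl) (fun d => (hmemrev d).symm) c⟩
  apply pvGridExt
  · rw [List.length_map, List.length_mapIdx, hAlen]
  · intro t
    have hL := pvRowlen_map_mapIdx gl (fun j v => if j < m ∧ v = 1 then 0 else v) t
    have hR := pvValN_mapIdx_mapIdx g
      (fun i j v => if j < m then
        (if PySem.Set.contains stv.2 ((i : Int), (j : Int)) then -1
         else if v = 1 then 0 else v) else v) 0 0
    have hR' := pvRowlen_mapIdx_mapIdx g
      (fun i j v => if j < m then
        (if PySem.Set.contains stv.2 ((i : Int), (j : Int)) then -1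
         else if v = 1 then 0 else v) else v) t
    beta_reduce at hL hR'
    rw [hL, hR', hArow]
  · intro i j
    have hL := pvValN_map_mapIdx gl (fun j v => if j < m ∧ v = 1 then 0 else v) i j
    have hR := pvValN_mapIdx_mapIdx g
      (fun i j v => if j < m then
        (if PySem.Set.contains stv.2 ((i : Int), (j : Int)) then -1
         else if v = 1 then 0 else v) else v) i j
    beta_reduce at hL hR
    rw [hL, hR, hAlen, hArow]
    by_cases hb : i < g.length ∧ j < (g.getD i []).length
    · rw [if_pos hb, if_pos hb]
      by_cases hRch : pvReach g n m seeds ((i : Int), (j : Int))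
      · have hv1 : pvValN gl i j = -1 := (hAval i j).1 ((hReqv _).2 hRch)
        have hlv := pvReach_live hRch
        have hjm : j < m := by
          have h4 := hlv.2.2.2.1
          simp only at h4
          omega
        have hmemS : ((i : Int), (j : Int)) ∈ stv.1 := (hmem_iff _).2 hRch
        rw [hv1, if_neg (by intro hh; norm_num at hh), if_pos hjm, hcont,
          decide_eq_true hmemS, if_pos rfl]
      · have hv1 : pvValN gl i j = pvValN g i j :=
          (hAval i j).2 (fun hcc => hRch ((hReqv _).1 hcc))
        have hnmem : ((i : Int), (j : Int)) ∉ stv.1 := fun hmm => hRch ((hmem_iff _).1 hmm)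
        rw [hv1, hcont, decide_eq_false hnmem]
        by_cases hjm : j < m
        · rw [if_pos hjm]
          simp only [Bool.false_eq_true, if_false]
          by_cases hv : pvValN g i j = 1
          · rw [if_pos ⟨hjm, hv⟩, if_pos hv]
          · rw [if_neg (fun hh => hv hh.2), if_neg hv]
        · rw [if_neg hjm, if_neg (fun hh => hjm hh.1)]
    · rw [if_neg hb, if_neg hb]

-- ===== VERDICT (by name: the statement is the Claim_ definition above) =====
theorem remove_isolated_ones_from_index_spec : Claim_equal_remove_isolated_ones_from_index := by
  intro arr si sj _ _
  unfold Spec_remove_isolated_ones_from_index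
  exact pvMain arr si sj
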